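-- pv_equiv track=rewrite | github.com/AngelDann/app-comisions-dist | apps/accounts/employee_sync.py | names_from_email_and_optional
-- ===== SOURCE A (Python) =====
-- def names_from_email_and_optional(email: str, first_name: str, last_name: str) -> tuple[str, str]:
--     fn, ln = (first_name or "").strip(), (last_name or "").strip()
--     if fn and ln:
--         return fn, ln
--     local, _, _ = (email or "").partition("@")
--     local = local.replace("_", " ").replace(".", " ")
--     tokens = [t for t in local.split() if t]
--     if fn and not ln:
--         return fn, (tokens[1].title() if len(tokens) > 1 else ".")
--     if ln and not fn:
--         return (tokens[0].title() if tokens else "Usuario"), ln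
--     if len(tokens) >= 2:
--         return tokens[0].title(), " ".join(x.title() for x in tokens[1:])
--     if tokens:
--         return tokens[0].title(), "."
--     return "Usuario", "."
-- ===== SOURCE B (Python) =====
-- def names_from_email_and_optional(email: str, first_name: str, last_name: str) -> tuple[str, str]:
--     fn = (first_name or "").strip()
--     ln = (last_name or "").strip()
--     # single character-level scan of the email local part: stops at '@', splits on
--     # '_' / '.' / whitespace, and title-cases each token on the fly
--     tokens = []
--     cur = []
--     prev_alpha = False
--     for ch in (email or ""):
--         if ch == '@':
--             break
--         if ch == '_' or ch == '.' or ch.isspace():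
--             if cur:
--                 tokens.append(''.join(cur))
--                 cur = []
--             prev_alpha = False
--         elif ch.isalpha():
--             cur.append(ch.lower() if prev_alpha else ch.upper())
--             prev_alpha = True
--         else:
--             cur.append(ch)
--             prev_alpha = False
--     if cur:
--         tokens.append(''.join(cur))
--     rest = tokens[1:2] if fn else tokens[1:]
--     first = fn or (tokens[0] if tokens else "Usuario")
--     last = ln or ' '.join(rest) or '.'
--     return first, last
-- ===== Notes on version B (the rewrite author's own statement) =====
-- stated objective: alternative
-- what changed: B replaces A's replace/split/title string-pipeline and five-way case return with a single character-level scan that tokenizes and title-cases the local part in one pass, then derives first and last independently with or-defaults.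
import Mathlib
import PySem

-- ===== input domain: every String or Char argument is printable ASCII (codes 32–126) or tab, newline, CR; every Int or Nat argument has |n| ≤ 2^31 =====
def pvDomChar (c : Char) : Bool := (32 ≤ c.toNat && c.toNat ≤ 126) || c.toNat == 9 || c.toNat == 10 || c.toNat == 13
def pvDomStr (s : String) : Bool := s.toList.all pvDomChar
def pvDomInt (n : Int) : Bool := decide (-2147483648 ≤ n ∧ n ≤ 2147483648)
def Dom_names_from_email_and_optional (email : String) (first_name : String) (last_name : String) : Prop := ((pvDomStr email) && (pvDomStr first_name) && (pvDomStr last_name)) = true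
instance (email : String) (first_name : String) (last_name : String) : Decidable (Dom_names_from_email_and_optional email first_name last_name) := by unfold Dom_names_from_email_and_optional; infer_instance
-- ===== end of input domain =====

-- B replaces A's replace/split/title pipeline and five-way case return with one character-level
-- scan that tokenizes and title-cases at once, then derives first/last independently; objective:
-- alternative algorithm, same cost.

-- A-side helper: Python str.title(), exact on the ASCII domain (where cased chars = letters)
def pvTitleGo : Bool → List Char → List Char
  | _, [] => []
  | prev, c :: rest =>
    if PySem.Chars.isalpha c then
      (if prev then PySem.Chars.lowerChar c else PySem.Chars.upperChar c) :: pvTitleGo true rest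
    else c :: pvTitleGo false rest

def pvTitle (s : String) : String := String.ofList (pvTitleGo false s.toList)

-- ===== PORT A =====
def names_from_email_and_optional (email : String) (first_name : String) (last_name : String) : String × String :=
  let fn := PySem.Str.strip first_name
  let ln := PySem.Str.strip last_name
  if fn ≠ "" ∧ ln ≠ "" then (fn, ln)
  else
    -- (email or "").partition("@")[0] ported by hand: the characters before the first '@' (exact)
    let locl := String.ofList (email.toList.takeWhile (fun c => c ≠ '@'))
    let locl2 := PySem.Str.replace (PySem.Str.replace locl "_" " ") "." " "
    let tokens := (PySem.Str.split₀ locl2).filter (fun t => t ≠ "")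
    if fn ≠ "" ∧ ln = "" then
      (fn, if tokens.length > 1 then pvTitle (tokens.getD 1 "") else ".")
    else if ln ≠ "" ∧ fn = "" then
      ((if tokens ≠ [] then pvTitle (tokens.getD 0 "") else "Usuario"), ln)
    else if tokens.length ≥ 2 then
      (pvTitle (tokens.getD 0 ""), PySem.Str.join " " ((tokens.drop 1).map pvTitle))
    else if tokens ≠ [] then
      (pvTitle (tokens.getD 0 ""), ".")
    else ("Usuario", ".")

-- ===== PORT B =====
-- B's one-pass scanner: break at '@', split on '_' / '.' / whitespace, title-case on the fly
-- (each token is appended to the accumulator as in Source B; 'prev' is Source B's prev_alpha flag)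
def bScan : List Char → List Char → Bool → List String → List String
  | [], cur, _, toks => if cur.isEmpty then toks else toks ++ [String.ofList cur]
  | c :: rest, cur, prev, toks =>
    if c = '@' then (if cur.isEmpty then toks else toks ++ [String.ofList cur])
    else if c = '_' ∨ c = '.' ∨ PySem.Chars.isspace c = true then
      bScan rest [] false (if cur.isEmpty then toks else toks ++ [String.ofList cur])
    else if PySem.Chars.isalpha c then
      bScan rest (cur ++ [if prev then PySem.Chars.lowerChar c else PySem.Chars.upperChar c]) true toks
    else bScan rest (cur ++ [c]) false toks

def names_from_email_and_optional_alt (email : String) (first_name : String) (last_name : String) : String × String :=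
  let fn := PySem.Str.strip first_name
  let ln := PySem.Str.strip last_name
  let tokens := bScan email.toList [] false []
  -- tokens[1:2] / tokens[1:] ported as drop/take (bounds are nonnegative literals: exact)
  let rest := if fn ≠ "" then (tokens.drop 1).take 1 else tokens.drop 1
  let first := if fn ≠ "" then fn else if tokens ≠ [] then tokens.getD 0 "" else "Usuario"
  let j := PySem.Str.join " " rest
  let last := if ln ≠ "" then ln else if j ≠ "" then j else "."
  (first, last)

-- ===== PRECONDITION & SPEC =====
def Spec_names_from_email_and_optional (email : String) (first_name : String) (last_name : String) (out : String × String) : Prop := out = names_from_email_and_optional_alt email first_name last_name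
instance (email : String) (first_name : String) (last_name : String) (out : String × String) : Decidable (Spec_names_from_email_and_optional email first_name last_name out) := by unfold Spec_names_from_email_and_optional; infer_instance

-- ===== CLAIM (what is proved, stated in full; the proofs are below) =====
def Claim_equal_names_from_email_and_optional : Prop := ∀ (email : String) (first_name : String) (last_name : String), Dom_names_from_email_and_optional email first_name last_name → Spec_names_from_email_and_optional email first_name last_name (names_from_email_and_optional email first_name last_name)

-- ===== LEMMAS AND PROOFS =====

-- titled token (as a string) of a raw token (as a char list)
def tStr (l : List Char) : String := String.ofList (pvTitleGo false l)

-- the character substitution A's two replaces perform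
def sepMap (c : Char) : Char := if c = '_' ∨ c = '.' then ' ' else c

-- the prev_alpha flag after title-casing a list
def tstate : Bool → List Char → Bool
  | p, [] => p
  | _, c :: rest => tstate (PySem.Chars.isalpha c) rest

theorem tstate_append_singleton (l : List Char) (c : Char) : ∀ p, tstate p (l ++ [c]) = PySem.Chars.isalpha c := by
  induction l with
  | nil => intro p; rfl
  | cons d rest ih => intro p; simpa [tstate] using ih (PySem.Chars.isalpha d)

theorem pvTitleGo_append (l m : List Char) : ∀ p, pvTitleGo p (l ++ m) = pvTitleGo p l ++ pvTitleGo (tstate p l) m := by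
  induction l with
  | nil => intro p; rfl
  | cons c rest ih =>
    intro p
    simp only [List.cons_append, pvTitleGo, tstate]
    split <;> rename_i h
    · simp [ih, h]
    · simp [ih, Bool.eq_false_iff.mpr h]

theorem pvTitleGo_length (p : Bool) (l : List Char) : (pvTitleGo p l).length = l.length := by
  induction l generalizing p with
  | nil => rfl
  | cons c cs ih => simp only [pvTitleGo]; split <;> simp [ih]

theorem pvTitleGo_isEmpty (p : Bool) (l : List Char) : (pvTitleGo p l).isEmpty = l.isEmpty := by
  cases l with
  | nil => rfl
  | cons c cs => simp only [pvTitleGo]; split <;> rfl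

-- PySem.Chars.replace with single-character pattern and replacement is a map
theorem replace_go_single (o n : Char) : ∀ (fuel : Nat) (l acc : List Char), l.length ≤ fuel →
    PySem.Chars.replace.go [o] [n] fuel l acc = acc.reverse ++ l.map (fun c => if c = o then n else c) := by
  intro fuel
  induction fuel with
  | zero =>
    intro l acc h
    have : l = [] := List.length_eq_zero_iff.mp (Nat.le_zero.mp h)
    subst this
    have h0 : PySem.Chars.replace.go [o] [n] 0 [] acc = acc.reverse ++ [] := rfl
    simp [h0]
  | succ f ih =>
    intro l acc h
    cases l with
    | nil => simp [PySem.Chars.replace.go]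
    | cons c t =>
      simp only [PySem.Chars.replace.go]
      by_cases hc : c = o
      · have hpre : List.isPrefixOf [o] (c :: t) = true := by
          simp [List.isPrefixOf, hc]
        rw [if_pos hpre]
        have := ih t ([n].reverse ++ acc) (by simpa using Nat.lt_succ_iff.mp (by simpa using h))
        simpa [hc] using this
      · have hpre : List.isPrefixOf [o] (c :: t) = false := by
          simp [List.isPrefixOf]; exact fun h' => (hc h'.symm).elim
        rw [if_neg (by simp [hpre])]
        have := ih t (c :: acc) (by simpa using Nat.lt_succ_iff.mp (by simpa using h))
        simpa [hc] using this

theorem replace_single (l : List Char) (o n : Char) :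
    PySem.Chars.replace l [o] [n] = l.map (fun c => if c = o then n else c) := by
  simpa [PySem.Chars.replace] using replace_go_single o n l.length l [] (le_refl _)

-- every raw token produced by Python's str.split() is a nonempty char list
theorem split₀_go_ne_nil (s : List Char) : ∀ (cur : List Char) (acc : List (List Char)),
    (∀ t ∈ acc, t ≠ []) → ∀ t ∈ PySem.Chars.split₀.go s cur acc, t ≠ [] := by
  induction s with
  | nil =>
    intro cur acc hacc t ht
    simp only [PySem.Chars.split₀.go] at ht
    by_cases hce : cur.isEmpty = true <;> simp only [hce, if_true] at ht
    · exact hacc t (List.mem_reverse.mp ht)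
    · rcases List.mem_cons.mp (List.mem_reverse.mp ht) with rfl | hm
      · simp only [List.isEmpty_iff] at hce
        simpa using hce
      · exact hacc t hm
  | cons c rest ih =>
    intro cur acc hacc t ht
    simp only [PySem.Chars.split₀.go] at ht
    by_cases hsp : PySem.Chars.isspace c = true <;>
      by_cases hce : cur.isEmpty = true <;>
      simp only [hsp, hce, if_true] at ht
    · exact ih [] acc hacc t ht
    · refine ih [] (cur.reverse :: acc) ?_ t ht
      intro u hu
      rcases List.mem_cons.mp hu with rfl | hm
      · simp only [List.isEmpty_iff] at hce; simpa using hce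
      · exact hacc u hm
    · exact ih (c :: cur) acc hacc t ht
    · exact ih (c :: cur) acc hacc t ht

theorem mem_strSplit₀_ne (s : String) : ∀ t ∈ PySem.Str.split₀ s, t ≠ "" := by
  intro t ht
  simp only [PySem.Str.split₀, List.mem_map] at ht
  obtain ⟨l, hl, rfl⟩ := ht
  have hne : l ≠ [] := split₀_go_ne_nil _ [] [] (by simp) l hl
  intro h
  exact hne (by simpa using congrArg String.toList h)

theorem pvTitle_ne (s : String) (h : s ≠ "") : pvTitle s ≠ "" := by
  intro hc
  have h2 : pvTitleGo false s.toList = [] := by simpa [pvTitle] using congrArg String.toList hc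
  have h3 : s.toList = [] := by
    have := pvTitleGo_length false s.toList
    rw [h2] at this; exact List.length_eq_zero_iff.mp this.symm
  exact h (String.ext (by simpa using h3))

theorem joinStr_ne (x : String) (xs : List String) (hx : x ≠ "") :
    PySem.Str.join " " (x :: xs) ≠ "" := by
  intro h
  have h2 : PySem.Chars.join " ".toList (x.toList :: (xs.map String.toList)) = [] := by
    simpa [PySem.Str.join] using congrArg String.toList h
  cases xs with
  | nil =>
    rw [List.map_nil, PySem.Chars.join_singleton] at h2
    exact hx (String.ext (by simpa using h2))
  | cons y ys =>
    rw [List.map_cons, PySem.Chars.join_cons_cons] at h2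
    simp at h2

-- the scanner, in mid-run, equals the titled image of split₀.go on the separator-mapped prefix
theorem bScan_go (cs : List Char) : ∀ (curA : List Char) (acc : List (List Char)),
    bScan cs (pvTitleGo false curA.reverse) (tstate false curA.reverse) (acc.reverse.map tStr)
      = (PySem.Chars.split₀.go ((cs.takeWhile (fun c => c ≠ '@')).map sepMap) curA acc).map tStr := by
  induction cs with
  | nil =>
    intro curA acc
    by_cases hce : curA.isEmpty = true
    · simp [bScan, PySem.Chars.split₀.go, pvTitleGo_isEmpty, hce]
    · simp [bScan, PySem.Chars.split₀.go, pvTitleGo_isEmpty, Bool.eq_false_iff.mpr hce, tStr]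
  | cons c rest ih =>
    intro curA acc
    by_cases hat : c = '@'
    · subst hat
      by_cases hce : curA.isEmpty = true
      · simp [bScan, PySem.Chars.split₀.go, pvTitleGo_isEmpty, hce]
      · simp [bScan, PySem.Chars.split₀.go, pvTitleGo_isEmpty, Bool.eq_false_iff.mpr hce, tStr]
    · simp only [List.takeWhile_cons, decide_eq_true_eq, if_pos (by simpa using hat), List.map_cons]
      by_cases hsep : c = '_' ∨ c = '.' ∨ PySem.Chars.isspace c = true
      · have hsm : PySem.Chars.isspace (sepMap c) = true := by
          rcases hsep with h | h | h
          · subst h; decide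
          · subst h; decide
          · have : sepMap c = c := by
              simp only [sepMap]
              rw [if_neg]
              rintro (rfl | rfl) <;> revert h <;> decide
            rw [this]; exact h
        simp only [bScan, if_neg hat, if_pos hsep, PySem.Chars.split₀.go, hsm, if_true]
        by_cases hce : curA.isEmpty = true
        · have h1 : (pvTitleGo false curA.reverse).isEmpty = true := by
            simp [pvTitleGo_isEmpty, List.isEmpty_reverse]; simpa using hce
          rw [if_pos h1, if_pos hce]
          simpa using ih [] acc
        · have h1 : (pvTitleGo false curA.reverse).isEmpty = false := by
            simp [pvTitleGo_isEmpty, List.isEmpty_reverse]; simpa using hce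
          rw [if_neg (by simp [h1]), if_neg (by simpa using hce)]
          have := ih [] (curA.reverse :: acc)
          simpa [tStr] using this
      · have hsm : PySem.Chars.isspace (sepMap c) = false := by
          have h1 : sepMap c = c := by
            simp only [sepMap]
            rw [if_neg]
            rintro (rfl | rfl) <;> exact hsep (by simp)
          rw [h1]
          rcases Bool.eq_false_or_eq_true (PySem.Chars.isspace c) with h | h
          · exact absurd (Or.inr (Or.inr h)) hsep
          · exact h
        have h1 : sepMap c = c := by
          simp only [sepMap]
          rw [if_neg]
          rintro (rfl | rfl) <;> exact hsep (by simp)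
        have hsm2 : PySem.Chars.isspace c = false := h1 ▸ hsm
        simp only [bScan, if_neg hat, PySem.Chars.split₀.go, h1, hsm2]
        have key : ∀ b : Bool, (if PySem.Chars.isalpha c = true then
              bScan rest (pvTitleGo false curA.reverse ++ [if tstate false curA.reverse then PySem.Chars.lowerChar c else PySem.Chars.upperChar c]) true (acc.reverse.map tStr)
            else bScan rest (pvTitleGo false curA.reverse ++ [c]) false (acc.reverse.map tStr))
            = bScan rest (pvTitleGo false (c :: curA).reverse) (tstate false (c :: curA).reverse) (acc.reverse.map tStr) := by
          intro _
          have e1 : pvTitleGo false (c :: curA).reverse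
              = pvTitleGo false curA.reverse ++ pvTitleGo (tstate false curA.reverse) [c] := by
            rw [List.reverse_cons, pvTitleGo_append]
          have e2 : tstate false (c :: curA).reverse = PySem.Chars.isalpha c := by
            rw [List.reverse_cons, tstate_append_singleton]
          rw [e1, e2]
          by_cases ha : PySem.Chars.isalpha c = true
          · simp [ha, pvTitleGo]
          · simp [ha, pvTitleGo]
        rw [key true, ih (c :: curA) acc]
        simp
        intro h
        exact absurd (h.elim Or.inl (fun h2 => Or.inr (Or.inl h2))) hsep

-- B's token list is the titled image of A's token list
theorem tokens_eq (email : String) :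
    bScan email.toList [] false []
      = ((PySem.Str.split₀ (PySem.Str.replace (PySem.Str.replace
            (String.ofList (email.toList.takeWhile (fun c => c ≠ '@'))) "_" " ") "." " ")).filter
          (fun t => t ≠ "")).map pvTitle := by
  have hrep : (PySem.Str.replace (PySem.Str.replace
      (String.ofList (email.toList.takeWhile (fun c => c ≠ '@'))) "_" " ") "." " ").toList
      = (email.toList.takeWhile (fun c => c ≠ '@')).map sepMap := by
    simp only [PySem.Str.toList_replace, String.toList_ofList]
    rw [show ("_" : String).toList = ['_'] from rfl, show ("." : String).toList = ['.'] from rfl,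
        show (" " : String).toList = [' '] from rfl]
    rw [replace_single, replace_single, List.map_map]
    apply List.map_congr_left
    intro c _
    simp only [Function.comp, sepMap]
    by_cases h1 : c = '_'
    · subst h1; simp
    · by_cases h2 : c = '.' <;> simp [h1, h2]
  have hsplit : PySem.Str.split₀ (PySem.Str.replace (PySem.Str.replace
      (String.ofList (email.toList.takeWhile (fun c => c ≠ '@'))) "_" " ") "." " ")
      = (PySem.Chars.split₀ ((email.toList.takeWhile (fun c => c ≠ '@')).map sepMap)).map String.ofList := by
    rw [PySem.Str.split₀, hrep]
  rw [hsplit]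
  have hfil : ((PySem.Chars.split₀ ((email.toList.takeWhile (fun c => c ≠ '@')).map sepMap)).map String.ofList).filter (fun t => t ≠ "")
      = (PySem.Chars.split₀ ((email.toList.takeWhile (fun c => c ≠ '@')).map sepMap)).map String.ofList := by
    apply List.filter_eq_self.mpr
    intro t ht
    simp only [List.mem_map] at ht
    obtain ⟨l, hl, rfl⟩ := ht
    have hne : l ≠ [] := split₀_go_ne_nil _ [] [] (by simp) l hl
    have hns : String.ofList l ≠ "" := fun h => hne (by simpa using congrArg String.toList h)
    simpa using hns
  rw [hfil, List.map_map]
  have : (pvTitle ∘ String.ofList) = tStr := by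
    funext l; simp [pvTitle, tStr]
  rw [this]
  have := bScan_go email.toList [] []
  simpa [PySem.Chars.split₀, pvTitleGo, tstate] using this

-- the two branch structures agree for any list of nonempty tokens
theorem joinStr_nil : PySem.Str.join " " ([] : List String) = "" := rfl

theorem joinStr_singleton (x : String) : PySem.Str.join " " [x] = x := by
  simp [PySem.Str.join, PySem.Chars.join_singleton]

theorem pv_core (fn ln : String) (ts : List String) (hts : ∀ t ∈ ts, t ≠ "") :
    (if fn ≠ "" ∧ ln ≠ "" then (fn, ln)
     else if fn ≠ "" ∧ ln = "" then (fn, if ts.length > 1 then pvTitle (ts.getD 1 "") else ".")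
     else if ln ≠ "" ∧ fn = "" then ((if ts ≠ [] then pvTitle (ts.getD 0 "") else "Usuario"), ln)
     else if ts.length ≥ 2 then (pvTitle (ts.getD 0 ""), PySem.Str.join " " ((ts.drop 1).map pvTitle))
     else if ts ≠ [] then (pvTitle (ts.getD 0 ""), ".")
     else ("Usuario", "."))
    =
    (let T := ts.map pvTitle
     let rest := if fn ≠ "" then (T.drop 1).take 1 else T.drop 1
     let first := if fn ≠ "" then fn else if T ≠ [] then T.getD 0 "" else "Usuario"
     let j := PySem.Str.join " " rest
     let last := if ln ≠ "" then ln else if j ≠ "" then j else "."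
     (first, last)) := by
  rcases ts with _ | ⟨a, _ | ⟨b, rest⟩⟩
  · by_cases hfn : fn = "" <;> by_cases hln : ln = "" <;>
      simp [hfn, hln, joinStr_nil]
  · by_cases hfn : fn = "" <;> by_cases hln : ln = "" <;>
      simp [hfn, hln, joinStr_nil]
  · have hb : pvTitle b ≠ "" := pvTitle_ne b (hts b (by simp))
    have hJ1 : PySem.Str.join " " [pvTitle b] ≠ "" := joinStr_ne _ _ hb
    have hJ : PySem.Str.join " " (pvTitle b :: rest.map pvTitle) ≠ "" := joinStr_ne _ _ hb
    by_cases hfn : fn = "" <;> by_cases hln : ln = "" <;>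
      simp [hfn, hln, hJ, hb, joinStr_singleton]

-- ===== VERDICT (by name: the statement is the Claim_ definition above) =====
theorem names_from_email_and_optional_spec : Claim_equal_names_from_email_and_optional := by
  intro email first_name last_name _
  unfold Spec_names_from_email_and_optional
  unfold names_from_email_and_optional names_from_email_and_optional_alt
  simp only []
  rw [tokens_eq email]
  exact pv_core _ _ _ (fun t ht => mem_strSplit₀_ne _ t (List.mem_of_mem_filter ht))
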